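-- pv_equiv track=rewrite | github.com/Gramet/adventofcode | 2019/day3/solution.py | get_crossing_points
-- ===== SOURCE A (Python) =====
-- def crossing_point(point_1_s, point_1_e, point_2_s, point_2_e):
--     if point_1_s[0] - point_1_e[0] != 0 and point_2_s[1] - point_2_e[1] != 0:
--         # horizontal segment_1 and vertical segment 2
--         if (
--             point_1_s[0] <= point_2_s[0] <= point_1_e[0]
--             or point_1_s[0] >= point_2_s[0] >= point_1_e[0]
--         ):
--             if (
--                 point_2_s[1] <= point_1_s[1] <= point_2_e[1]
--                 or point_2_s[1] >= point_1_s[1] >= point_2_e[1]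
--             ):
--                 return (point_2_s[0], point_1_s[1])
--     elif point_1_s[1] - point_1_e[1] != 0 and point_2_s[0] - point_2_e[0] != 0:
--         return crossing_point(point_2_s, point_2_e, point_1_s, point_1_e)
--     else:
--         return None
--
-- def get_crossing_points(angles_1, angles_2):
--     intersects = []
--     for point_1_s, point_1_e in zip(angles_1[:-1], angles_1[1:]):
--         for point_2_s, point_2_e in zip(angles_2[:-1], angles_2[1:]):
--             cross = crossing_point(point_1_s, point_1_e, point_2_s, point_2_e)
--             if cross is not None:
--                 intersects.append(cross)
--
--     return intersects
-- ===== SOURCE B (Python) =====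
-- def _bounds(arr, lo_val, hi_val):
--     # arr is sorted by its first component; return [start, stop) of keys in [lo_val, hi_val]
--     lo, hi = 0, len(arr)
--     while lo < hi:
--         mid = (lo + hi) // 2
--         if arr[mid][0] < lo_val:
--             lo = mid + 1
--         else:
--             hi = mid
--     start = lo
--     hi = len(arr)
--     while lo < hi:
--         mid = (lo + hi) // 2
--         if arr[mid][0] <= hi_val:
--             lo = mid + 1
--         else:
--             hi = mid
--     return start, lo
--
--
-- def get_crossing_points(angles_1, angles_2):
--     # index path-2 segments once: 'vertical' candidates (dy != 0) sorted by start x,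
--     # 'horizontal' candidates (dx != 0) sorted by start y; binary-search each path-1
--     # segment against them and emit the hits ordered by path-2 segment index.
--     vert = []   # (start_x, j, ylo, yhi)
--     horiz = []  # (start_y, j, xlo, xhi, dy != 0)
--     j = 0
--     for (sx, sy), (ex, ey) in zip(angles_2, angles_2[1:]):
--         if sy != ey:
--             vert.append((sx, j, min(sy, ey), max(sy, ey)))
--         if sx != ex:
--             horiz.append((sy, j, min(sx, ex), max(sx, ex), sy != ey))
--         j += 1
--     vert.sort(key=lambda t: t[0])
--     horiz.sort(key=lambda t: t[0])
--     out = []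
--     for (sx, sy), (ex, ey) in zip(angles_1, angles_1[1:]):
--         hits = []
--         if sx != ex:
--             a, b = _bounds(vert, min(sx, ex), max(sx, ex))
--             for x2, j2, ylo, yhi in vert[a:b]:
--                 if ylo <= sy <= yhi:
--                     hits.append((j2, (x2, sy)))
--         if sy != ey:
--             a, b = _bounds(horiz, min(sy, ey), max(sy, ey))
--             for y2, j2, xlo, xhi, v in horiz[a:b]:
--                 if not (sx != ex and v) and xlo <= sx <= xhi:
--                     hits.append((j2, (sx, y2)))
--         hits.sort(key=lambda t: t[0])
--         out.extend(p for _, p in hits)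
--     return out
-- ===== Notes on version B (the rewrite author's own statement) =====
-- stated objective: faster
-- what changed: B indexes path-2 segments once into two coordinate-sorted candidate arrays (verticals by x, horizontals by y), locates each path-1 segment's coordinate window by hand-written binary search instead of scanning all pairs, and restores A's output order by sorting each segment's hits by path-2 segment index.
import Mathlib
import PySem

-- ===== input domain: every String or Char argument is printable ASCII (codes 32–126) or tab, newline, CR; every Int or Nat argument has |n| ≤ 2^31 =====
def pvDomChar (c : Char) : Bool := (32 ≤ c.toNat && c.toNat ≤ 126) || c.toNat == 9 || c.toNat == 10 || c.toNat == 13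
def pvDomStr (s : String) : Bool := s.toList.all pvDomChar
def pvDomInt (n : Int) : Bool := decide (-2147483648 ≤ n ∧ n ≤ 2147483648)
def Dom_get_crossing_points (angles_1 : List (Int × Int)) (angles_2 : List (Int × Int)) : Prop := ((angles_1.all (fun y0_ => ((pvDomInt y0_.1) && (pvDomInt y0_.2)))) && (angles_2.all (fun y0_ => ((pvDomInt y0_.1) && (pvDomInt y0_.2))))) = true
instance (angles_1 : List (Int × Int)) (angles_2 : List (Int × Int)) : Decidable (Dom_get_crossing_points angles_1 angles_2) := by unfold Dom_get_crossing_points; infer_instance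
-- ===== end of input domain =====

-- B replaces A's all-pairs scan by an index: path-2 segments are bucketed once into
-- vertical/horizontal candidate arrays sorted by coordinate, each path-1 segment is matched
-- by hand-written binary search on those arrays, and the per-segment hits are re-ordered by
-- path-2 segment index; same return value, different algorithm.

-- ===== PORT A =====
-- crossing_point recurses by swapping its arguments; the swapped call always takes the first
-- branch, so recursion depth is at most 1: fuel 2 at the call site is exact.
def crossing_point : Nat → (Int × Int) → (Int × Int) → (Int × Int) → (Int × Int) → Option (Int × Int)
  | 0, _, _, _, _ => none
  | fuel + 1, p1s, p1e, p2s, p2e =>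
    if p1s.1 - p1e.1 ≠ 0 ∧ p2s.2 - p2e.2 ≠ 0 then
      if (p1s.1 ≤ p2s.1 ∧ p2s.1 ≤ p1e.1) ∨ (p1s.1 ≥ p2s.1 ∧ p2s.1 ≥ p1e.1) then
        if (p2s.2 ≤ p1s.2 ∧ p1s.2 ≤ p2e.2) ∨ (p2s.2 ≥ p1s.2 ∧ p1s.2 ≥ p2e.2) then
          some (p2s.1, p1s.2)
        else none
      else none
    else if p1s.2 - p1e.2 ≠ 0 ∧ p2s.1 - p2e.1 ≠ 0 then
      crossing_point fuel p2s p2e p1s p1e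
    else none

def get_crossing_points (angles_1 : List (Int × Int)) (angles_2 : List (Int × Int)) : List (Int × Int) :=
  (List.zip (PySem.List.slice angles_1 none (some (-1))) (PySem.List.slice angles_1 (some 1) none)).foldl
    (fun intersects p1 =>
      (List.zip (PySem.List.slice angles_2 none (some (-1))) (PySem.List.slice angles_2 (some 1) none)).foldl
        (fun intersects p2 =>
          match crossing_point 2 p1.1 p1.2 p2.1 p2.2 with
          | some cross => intersects ++ [cross]
          | none => intersects) intersects) []

-- ===== PORT B =====
-- the two while-loops of Source B's _bounds (lo, hi are non-negative Python ints, so (lo+hi)//2 is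
-- Nat division; arr[mid] is always in range, the 'none' arm is unreachable)
def pvLower {α : Type} (key : α → Int) (x : Int) (arr : List α) (lo hi : Nat) : Nat :=
  if h : lo < hi then
    match arr[(lo + hi) / 2]? with
    | some t => if key t < x then pvLower key x arr ((lo + hi) / 2 + 1) hi
                else pvLower key x arr lo ((lo + hi) / 2)
    | none => lo
  else lo
termination_by hi - lo
decreasing_by all_goals omega

def pvUpper {α : Type} (key : α → Int) (x : Int) (arr : List α) (lo hi : Nat) : Nat :=
  if h : lo < hi then
    match arr[(lo + hi) / 2]? with
    | some t => if key t ≤ x then pvUpper key x arr ((lo + hi) / 2 + 1) hi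
                else pvUpper key x arr lo ((lo + hi) / 2)
    | none => lo
  else lo
termination_by hi - lo
decreasing_by all_goals omega

-- Source B's _bounds
def pvBounds {α : Type} (key : α → Int) (arr : List α) (lov hiv : Int) : Nat × Nat :=
  let start := pvLower key lov arr 0 arr.length
  (start, pvUpper key hiv arr start arr.length)

def get_crossing_points_alt (angles_1 : List (Int × Int)) (angles_2 : List (Int × Int)) : List (Int × Int) :=
  let vh := (List.zip angles_2 angles_2.tail).foldl
    (fun (acc : List (Int × Int × Int × Int) × List (Int × Int × Int × Int × Bool) × Int) p =>
      let v := if p.1.2 ≠ p.2.2 then acc.1 ++ [(p.1.1, acc.2.2, min p.1.2 p.2.2, max p.1.2 p.2.2)] else acc.1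
      let h := if p.1.1 ≠ p.2.1 then acc.2.1 ++ [(p.1.2, acc.2.2, min p.1.1 p.2.1, max p.1.1 p.2.1, decide (p.1.2 ≠ p.2.2))] else acc.2.1
      (v, h, acc.2.2 + 1)) ([], [], 0)
  let vert := PySem.List.sorted vh.1 (fun t => t.1)
  let horiz := PySem.List.sorted vh.2.1 (fun t => t.1)
  (List.zip angles_1 angles_1.tail).foldl (fun out p =>
    let sx := p.1.1; let sy := p.1.2; let ex := p.2.1; let ey := p.2.2
    let hits1 : List (Int × Int × Int) :=
      if sx ≠ ex then
        let ab := pvBounds (fun t => t.1) vert (min sx ex) (max sx ex)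
        (PySem.List.slice vert (some (ab.1 : Int)) (some (ab.2 : Int))).foldl
          (fun h t => if t.2.2.1 ≤ sy ∧ sy ≤ t.2.2.2 then h ++ [(t.2.1, t.1, sy)] else h) []
      else []
    let hits : List (Int × Int × Int) :=
      if sy ≠ ey then
        let ab := pvBounds (fun t => t.1) horiz (min sy ey) (max sy ey)
        (PySem.List.slice horiz (some (ab.1 : Int)) (some (ab.2 : Int))).foldl
          (fun h t => if ¬(sx ≠ ex ∧ t.2.2.2.2 = true) ∧ t.2.2.1 ≤ sx ∧ sx ≤ t.2.2.2.1 then h ++ [(t.2.1, sx, t.1)] else h) hits1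
      else hits1
    out ++ (PySem.List.sorted hits (fun t => t.1)).map (fun t => t.2)) []

-- ===== PRECONDITION & SPEC =====
def Spec_get_crossing_points (angles_1 : List (Int × Int)) (angles_2 : List (Int × Int)) (out : List (Int × Int)) : Prop := out = get_crossing_points_alt angles_1 angles_2
instance (angles_1 : List (Int × Int)) (angles_2 : List (Int × Int)) (out : List (Int × Int)) : Decidable (Spec_get_crossing_points angles_1 angles_2 out) := by unfold Spec_get_crossing_points; infer_instance

-- ===== CLAIM (what is proved, stated in full; the proofs are below) =====
def Claim_equal_get_crossing_points : Prop := ∀ (angles_1 : List (Int × Int)) (angles_2 : List (Int × Int)), Dom_get_crossing_points angles_1 angles_2 → Spec_get_crossing_points angles_1 angles_2 (get_crossing_points angles_1 angles_2)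

-- ===== LEMMAS AND PROOFS =====

-- type abbreviations used only by the proofs
-- the two bucket entries: (x, j, ylo, yhi) and (y, j, xlo, xhi, dy≠0)
def pvFV (p : Int × ((Int × Int) × (Int × Int))) : Option (Int × Int × Int × Int) :=
  if p.2.1.2 ≠ p.2.2.2 then some (p.2.1.1, p.1, min p.2.1.2 p.2.2.2, max p.2.1.2 p.2.2.2) else none

def pvFH (p : Int × ((Int × Int) × (Int × Int))) : Option (Int × Int × Int × Int × Bool) :=
  if p.2.1.1 ≠ p.2.2.1 then some (p.2.1.2, p.1, min p.2.1.1 p.2.2.1, max p.2.1.1 p.2.2.1, decide (p.2.1.2 ≠ p.2.2.2)) else none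

-- what A emits for one path-1 segment q and one indexed path-2 segment p
def pvA (q : (Int × Int) × (Int × Int)) (p : Int × ((Int × Int) × (Int × Int))) : Option (Int × Int × Int) :=
  (crossing_point 2 q.1 q.2 p.2.1 p.2.2).map (fun c => (p.1, c))

-- A's zip(xs[:-1], xs[1:]) pairs the same elements as B's zip(pts, pts[1:]).
theorem zip_dropLast_tail {α : Type} (l : List α) : List.zip l.dropLast l.tail = List.zip l l.tail := by
  match l with
  | [] => rfl
  | [a] => rfl
  | a :: b :: t =>
    have ih := zip_dropLast_tail (b :: t)
    simp only [List.tail_cons] at ih ⊢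
    simp [List.dropLast, List.zip_cons_cons, ih]

-- invariant of Source B's first while loop (lower bound)
theorem pvLower_inv {α : Type} (key : α → Int) (x : Int) (arr : List α)
    (hs : arr.Pairwise (fun a b => key a ≤ key b)) :
    ∀ (n lo hi : Nat), hi - lo = n → lo ≤ hi → hi ≤ arr.length →
      lo ≤ pvLower key x arr lo hi ∧ pvLower key x arr lo hi ≤ hi ∧
      (∀ i (_ : i < arr.length), lo ≤ i → i < pvLower key x arr lo hi → key arr[i] < x) ∧
      (∀ i (_ : i < arr.length), pvLower key x arr lo hi ≤ i → i < hi → x ≤ key arr[i]) := by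
  have hmono : ∀ (i j : Nat) (_ : i < arr.length) (_ : j < arr.length), i ≤ j → key arr[i] ≤ key arr[j] := by
    intro i j hi hj hij
    rcases Nat.eq_or_lt_of_le hij with h | h
    · subst h; exact le_refl _
    · exact (List.pairwise_iff_getElem.mp hs) i j hi hj h
  intro n
  induction n using Nat.strong_induction_on with
  | _ n ih =>
    intro lo hi hn hlh hhl
    rw [pvLower]
    by_cases hlt : lo < hi
    · have hmidlt : (lo + hi) / 2 < arr.length := by omega
      rw [dif_pos hlt, List.getElem?_eq_getElem hmidlt]
      dsimp only
      by_cases hkey : key arr[(lo + hi) / 2] < x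
      · rw [if_pos hkey]
        obtain ⟨h1, h2, h3, h4⟩ := ih (hi - ((lo + hi) / 2 + 1)) (by omega) ((lo + hi) / 2 + 1) hi rfl (by omega) hhl
        refine ⟨by omega, h2, ?_, h4⟩
        intro i hilen hloi hir
        by_cases hle : i ≤ (lo + hi) / 2
        · exact lt_of_le_of_lt (hmono i _ hilen hmidlt hle) hkey
        · exact h3 i hilen (by omega) hir
      · rw [if_neg hkey]
        obtain ⟨h1, h2, h3, h4⟩ := ih ((lo + hi) / 2 - lo) (by omega) lo ((lo + hi) / 2) rfl (by omega) (by omega)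
        refine ⟨h1, by omega, h3, ?_⟩
        intro i hilen hri hihi
        by_cases hle : (lo + hi) / 2 ≤ i
        · exact le_trans (not_lt.mp hkey) (hmono _ i hmidlt hilen hle)
        · exact h4 i hilen hri (by omega)
    · rw [dif_neg hlt]
      exact ⟨le_refl _, hlh, by omega, by omega⟩

-- invariant of Source B's second while loop (upper bound)
theorem pvUpper_inv {α : Type} (key : α → Int) (x : Int) (arr : List α)
    (hs : arr.Pairwise (fun a b => key a ≤ key b)) :
    ∀ (n lo hi : Nat), hi - lo = n → lo ≤ hi → hi ≤ arr.length →
      lo ≤ pvUpper key x arr lo hi ∧ pvUpper key x arr lo hi ≤ hi ∧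
      (∀ i (_ : i < arr.length), lo ≤ i → i < pvUpper key x arr lo hi → key arr[i] ≤ x) ∧
      (∀ i (_ : i < arr.length), pvUpper key x arr lo hi ≤ i → i < hi → x < key arr[i]) := by
  have hmono : ∀ (i j : Nat) (_ : i < arr.length) (_ : j < arr.length), i ≤ j → key arr[i] ≤ key arr[j] := by
    intro i j hi hj hij
    rcases Nat.eq_or_lt_of_le hij with h | h
    · subst h; exact le_refl _
    · exact (List.pairwise_iff_getElem.mp hs) i j hi hj h
  intro n
  induction n using Nat.strong_induction_on with
  | _ n ih =>
    intro lo hi hn hlh hhl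
    rw [pvUpper]
    by_cases hlt : lo < hi
    · have hmidlt : (lo + hi) / 2 < arr.length := by omega
      rw [dif_pos hlt, List.getElem?_eq_getElem hmidlt]
      dsimp only
      by_cases hkey : key arr[(lo + hi) / 2] ≤ x
      · rw [if_pos hkey]
        obtain ⟨h1, h2, h3, h4⟩ := ih (hi - ((lo + hi) / 2 + 1)) (by omega) ((lo + hi) / 2 + 1) hi rfl (by omega) hhl
        refine ⟨by omega, h2, ?_, h4⟩
        intro i hilen hloi hir
        by_cases hle : i ≤ (lo + hi) / 2
        · exact le_trans (hmono i _ hilen hmidlt hle) hkey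
        · exact h3 i hilen (by omega) hir
      · rw [if_neg hkey]
        obtain ⟨h1, h2, h3, h4⟩ := ih ((lo + hi) / 2 - lo) (by omega) lo ((lo + hi) / 2) rfl (by omega) (by omega)
        refine ⟨h1, by omega, h3, ?_⟩
        intro i hilen hri hihi
        by_cases hle : (lo + hi) / 2 ≤ i
        · exact lt_of_lt_of_le (not_le.mp hkey) (hmono _ i hmidlt hilen hle)
        · exact h4 i hilen hri (by omega)
    · rw [dif_neg hlt]
      exact ⟨le_refl _, hlh, by omega, by omega⟩

-- a filter whose truth is exactly an index window is the corresponding drop/take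
theorem filter_eq_drop_take {α : Type} (P : α → Bool) :
    ∀ (arr : List α) (a b : Nat), a ≤ b → b ≤ arr.length →
      (∀ i (_ : i < arr.length), P arr[i] = true ↔ (a ≤ i ∧ i < b)) →
      arr.filter P = (arr.drop a).take (b - a) := by
  intro arr
  induction arr with
  | nil => intro a b _ _ _; simp
  | cons x t ihl =>
    intro a b hab hblen hiff
    match a, b with
    | 0, 0 =>
      have hx : P x = false := by
        have := hiff 0 (by simp)
        simp at this; simpa using this
      have ht : t.filter P = (t.drop 0).take 0 := by
        apply ihl 0 0 (le_refl _) (by omega)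
        intro i hi
        have := hiff (i + 1) (by simpa using Nat.succ_lt_succ hi)
        simp at this ⊢
        simpa using this
      simp [hx]
      simpa using ht
    | 0, b' + 1 =>
      have hx : P x = true := by
        have := hiff 0 (by simp)
        simpa using this.mpr ⟨le_refl _, by omega⟩
      have ht : t.filter P = (t.drop 0).take b' := by
        apply ihl 0 b' (by omega) (by simpa using hblen)
        intro i hi
        have := hiff (i + 1) (by simpa using Nat.succ_lt_succ hi)
        simp at this ⊢
        exact this
      simp [hx, List.take_succ_cons]
      simpa using ht
    | a' + 1, b =>
      have hb : 1 ≤ b := by omega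
      have hx : P x = false := by
        have := hiff 0 (by simp)
        simp at this
        simpa using this
      have ht : t.filter P = (t.drop a').take (b - 1 - a') := by
        apply ihl a' (b - 1) (by omega) (by simp at hblen; omega)
        intro i hi
        have := hiff (i + 1) (by simpa using Nat.succ_lt_succ hi)
        by_cases hp : P t[i] = true <;> simp [hp] at this ⊢ <;> omega
      simp [hx, List.drop_succ_cons]
      rw [ht]
      congr 1
      omega

-- the two binary searches on a key-sorted array delimit exactly the key window [lov, hiv]
theorem pvBounds_slice {α : Type} (key : α → Int) (arr : List α) (lov hiv : Int)
    (hs : arr.Pairwise (fun a b => key a ≤ key b)) :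
    PySem.List.slice arr (some ((pvBounds key arr lov hiv).1 : Int)) (some ((pvBounds key arr lov hiv).2 : Int))
      = arr.filter (fun t => decide (lov ≤ key t) && decide (key t ≤ hiv)) := by
  obtain ⟨hl1, hl2, hl3, hl4⟩ := pvLower_inv key lov arr hs (arr.length - 0) 0 arr.length rfl (by omega) (le_refl _)
  obtain ⟨hu1, hu2, hu3, hu4⟩ := pvUpper_inv key hiv arr hs
    (arr.length - pvLower key lov arr 0 arr.length) (pvLower key lov arr 0 arr.length) arr.length rfl hl2 (le_refl _)
  have hiff : ∀ i (_ : i < arr.length),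
      (decide (lov ≤ key arr[i]) && decide (key arr[i] ≤ hiv)) = true ↔
      (pvLower key lov arr 0 arr.length ≤ i ∧ i < pvUpper key hiv arr (pvLower key lov arr 0 arr.length) arr.length) := by
    intro i hi
    simp only [Bool.and_eq_true, decide_eq_true_eq]
    constructor
    · rintro ⟨hlo, hhi⟩
      constructor
      · by_contra hc
        exact absurd (hl3 i hi (by omega) (by omega)) (by omega)
      · by_contra hc
        exact absurd (hu4 i hi (by omega) (by omega)) (by omega)
    · rintro ⟨h1, h2⟩
      exact ⟨hl4 i hi (by omega) hi, hu3 i hi h1 h2⟩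
  have := filter_eq_drop_take (fun t => decide (lov ≤ key t) && decide (key t ≤ hiv)) arr
    (pvLower key lov arr 0 arr.length) (pvUpper key hiv arr (pvLower key lov arr 0 arr.length) arr.length)
    hu1 hu2 hiff
  simp only [pvBounds, PySem.List.slice_natCast]
  exact this.symm

-- the single indexing pass of Source B builds exactly the two filterMap buckets
theorem build_spec :
    ∀ (l : List ((Int × Int) × (Int × Int))) (j : Int) (v0 : List (Int × Int × Int × Int))
      (h0 : List (Int × Int × Int × Int × Bool)),
      l.foldl (fun acc p =>
        let v := if p.1.2 ≠ p.2.2 then acc.1 ++ [(p.1.1, acc.2.2, min p.1.2 p.2.2, max p.1.2 p.2.2)] else acc.1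
        let h := if p.1.1 ≠ p.2.1 then acc.2.1 ++ [(p.1.2, acc.2.2, min p.1.1 p.2.1, max p.1.1 p.2.1, decide (p.1.2 ≠ p.2.2))] else acc.2.1
        (v, h, acc.2.2 + 1)) (v0, h0, j)
      = (v0 ++ (PySem.List.enumerate l j).filterMap pvFV, h0 ++ (PySem.List.enumerate l j).filterMap pvFH,
         j + l.length) := by
  intro l
  induction l with
  | nil => intro j v0 h0; simp [PySem.List.enumerate]
  | cons p t ih =>
    intro j v0 h0
    rw [List.foldl_cons]
    dsimp only
    rw [ih, PySem.List.enumerate_cons]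
    simp only [List.filterMap_cons, pvFV, pvFH]
    split_ifs with h1 h2 h2 <;> simp <;> omega

-- A's inner loop over path 2, with the segments enumerated
theorem a_inner (q : (Int × Int) × (Int × Int)) :
    ∀ (l : List ((Int × Int) × (Int × Int))) (j : Int) (acc : List (Int × Int)),
      l.foldl (fun intersects p2 =>
        match crossing_point 2 q.1 q.2 p2.1 p2.2 with
        | some cross => intersects ++ [cross]
        | none => intersects) acc
      = acc ++ ((PySem.List.enumerate l j).filterMap (pvA q)).map (fun t => t.2) := by
  intro l
  induction l with
  | nil => intro j acc; simp [PySem.List.enumerate]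
  | cons p t ih =>
    intro j acc
    have hpa : pvA q (j, p) = (crossing_point 2 q.1 q.2 p.1 p.2).map (fun c => (j, c)) := rfl
    rw [List.foldl_cons, PySem.List.enumerate_cons, List.filterMap_cons, hpa]
    cases hc : crossing_point 2 q.1 q.2 p.1 p.2 with
    | none => simp only [Option.map_none]; rw [ih (j + 1)]
    | some c => simp only [Option.map_some]; rw [ih (j + 1)]; simp

-- interleaving two disjoint filterMaps is a permutation of their pointwise union
theorem filterMap_append_perm {α β : Type} (f g h : α → Option β) :
    ∀ (l : List α), (∀ x ∈ l, h x = (f x).or (g x)) → (∀ x ∈ l, f x = none ∨ g x = none) →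
      (l.filterMap f ++ l.filterMap g).Perm (l.filterMap h) := by
  intro l
  induction l with
  | nil => intro _ _; simp
  | cons p t ih =>
    intro hor hdis
    have hht := ih (fun x hx => hor x (List.mem_cons_of_mem _ hx))
      (fun x hx => hdis x (List.mem_cons_of_mem _ hx))
    have horp := hor p List.mem_cons_self
    rcases hdis p List.mem_cons_self with hf | hg
    · rw [List.filterMap_cons, List.filterMap_cons, List.filterMap_cons, hf, horp, hf]
      simp only [Option.none_or]
      cases hgp : g p with
      | none => simpa using hht
      | some b => exact List.perm_middle.trans (hht.cons b)
    · rw [List.filterMap_cons, List.filterMap_cons, List.filterMap_cons, hg, horp, hg]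
      simp only [Option.or_none]
      cases hfp : f p with
      | none => simpa using hht
      | some b => simpa using hht.cons b

-- what B's vertical-index query contributes for one indexed path-2 segment
def pvG1 (sx sy ex ey : Int) (x : Int × ((Int × Int) × (Int × Int))) : Option (Int × Int × Int) :=
  if sx ≠ ex then
    ((pvFV x).filter (fun t => decide (t.2.2.1 ≤ sy ∧ sy ≤ t.2.2.2) &&
        (decide (min sx ex ≤ t.1) && decide (t.1 ≤ max sx ex)))).map (fun t => (t.2.1, t.1, sy))
  else none

-- what B's horizontal-index query contributes for one indexed path-2 segment
def pvG2 (sx sy ex ey : Int) (x : Int × ((Int × Int) × (Int × Int))) : Option (Int × Int × Int) :=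
  if sy ≠ ey then
    ((pvFH x).filter (fun t => decide (¬(sx ≠ ex ∧ t.2.2.2.2 = true) ∧ t.2.2.1 ≤ sx ∧ sx ≤ t.2.2.2.1) &&
        (decide (min sy ey ≤ t.1) && decide (t.1 ≤ max sy ey)))).map (fun t => (t.2.1, sx, t.1)) 
  else none

-- pointwise: A's crossing_point is exactly the union of B's two query contributions
set_option maxHeartbeats 4000000 in
theorem point_or (sx sy ex ey : Int) (x : Int × ((Int × Int) × (Int × Int))) :
    pvA ((sx, sy), (ex, ey)) x = (pvG1 sx sy ex ey x).or (pvG2 sx sy ex ey x) := by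
  obtain ⟨j, ⟨⟨a, b⟩, ⟨c, d⟩⟩⟩ := x
  simp only [pvA, pvG1, pvG2, pvFV, pvFH, crossing_point, Option.filter, Option.or]
  split_ifs <;> simp_all <;> try omega
  all_goals (split_ifs <;> (try simp_all) <;> omega)

-- the two query contributions never fire on the same path-2 segment
theorem pvG_disjoint (sx sy ex ey : Int) (x : Int × ((Int × Int) × (Int × Int))) :
    pvG1 sx sy ex ey x = none ∨ pvG2 sx sy ex ey x = none := by
  obtain ⟨j, ⟨⟨a, b⟩, ⟨c, d⟩⟩⟩ := x
  simp only [pvG1, pvG2, pvFV, pvFH, Option.filter]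
  split_ifs <;> simp_all

-- bridge: the port's ifs are on decidable Props
theorem foldl_append_if' {α β : Type} (P : α → Prop) [DecidablePred P] (f : α → β)
    (l : List α) (acc : List β) :
    l.foldl (fun acc x => if P x then acc ++ [f x] else acc) acc
      = acc ++ (l.filter (fun x => decide (P x))).map f := by
  have := PySem.List.foldl_append_if (fun x => decide (P x)) f l acc
  simpa using this

-- per path-1 segment: B's two index queries, merged back by segment index, emit exactly
-- what A's inner loop emits
theorem hits_eq (E : List (Int × ((Int × Int) × (Int × Int)))) (sx sy ex ey : Int)
    (hE : E.Pairwise (fun p q => p.1 < q.1)) :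
    PySem.List.sorted
      (if sy ≠ ey then
        List.foldl
          (fun h t => if ¬(sx ≠ ex ∧ t.2.2.2.2 = true) ∧ t.2.2.1 ≤ sx ∧ sx ≤ t.2.2.2.1 then h ++ [(t.2.1, sx, t.1)] else h)
          (if sx ≠ ex then
            List.foldl (fun h t => if t.2.2.1 ≤ sy ∧ sy ≤ t.2.2.2 then h ++ [(t.2.1, t.1, sy)] else h) []
              (PySem.List.slice (PySem.List.sorted (E.filterMap pvFV) (fun t => t.1))
                (some ((pvBounds (fun t => t.1) (PySem.List.sorted (E.filterMap pvFV) (fun t => t.1)) (min sx ex) (max sx ex)).1 : Int))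
                (some ((pvBounds (fun t => t.1) (PySem.List.sorted (E.filterMap pvFV) (fun t => t.1)) (min sx ex) (max sx ex)).2 : Int)))
          else [])
          (PySem.List.slice (PySem.List.sorted (E.filterMap pvFH) (fun t => t.1))
            (some ((pvBounds (fun t => t.1) (PySem.List.sorted (E.filterMap pvFH) (fun t => t.1)) (min sy ey) (max sy ey)).1 : Int))
            (some ((pvBounds (fun t => t.1) (PySem.List.sorted (E.filterMap pvFH) (fun t => t.1)) (min sy ey) (max sy ey)).2 : Int)))
      else
        if sx ≠ ex then
          List.foldl (fun h t => if t.2.2.1 ≤ sy ∧ sy ≤ t.2.2.2 then h ++ [(t.2.1, t.1, sy)] else h) []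
            (PySem.List.slice (PySem.List.sorted (E.filterMap pvFV) (fun t => t.1))
              (some ((pvBounds (fun t => t.1) (PySem.List.sorted (E.filterMap pvFV) (fun t => t.1)) (min sx ex) (max sx ex)).1 : Int))
              (some ((pvBounds (fun t => t.1) (PySem.List.sorted (E.filterMap pvFV) (fun t => t.1)) (min sx ex) (max sx ex)).2 : Int)))
        else []) (fun t => t.1)
    = E.filterMap (pvA ((sx, sy), (ex, ey))) := by
  have hsv := PySem.List.sorted_pairwise (E.filterMap pvFV) (fun t => t.1)
  have hsh := PySem.List.sorted_pairwise (E.filterMap pvFH) (fun t => t.1)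
  have hfold1 :
      List.foldl (fun h t => if t.2.2.1 ≤ sy ∧ sy ≤ t.2.2.2 then h ++ [(t.2.1, t.1, sy)] else h) ([] : List (Int × Int × Int))
        (PySem.List.slice (PySem.List.sorted (E.filterMap pvFV) (fun t => t.1))
          (some ((pvBounds (fun t => t.1) (PySem.List.sorted (E.filterMap pvFV) (fun t => t.1)) (min sx ex) (max sx ex)).1 : Int))
          (some ((pvBounds (fun t => t.1) (PySem.List.sorted (E.filterMap pvFV) (fun t => t.1)) (min sx ex) (max sx ex)).2 : Int)))
      = (((PySem.List.sorted (E.filterMap pvFV) (fun t => t.1)).filter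
          (fun t => decide (t.2.2.1 ≤ sy ∧ sy ≤ t.2.2.2) && (decide (min sx ex ≤ t.1) && decide (t.1 ≤ max sx ex)))).map
          (fun t => (t.2.1, t.1, sy))) := by
    rw [pvBounds_slice (fun t : Int × Int × Int × Int => t.1)
      (PySem.List.sorted (E.filterMap pvFV) (fun t => t.1)) (min sx ex) (max sx ex) hsv]
    rw [foldl_append_if' (fun t : Int × Int × Int × Int => t.2.2.1 ≤ sy ∧ sy ≤ t.2.2.2)
      (fun t => (t.2.1, t.1, sy))]
    rw [List.filter_filter]
    simp
  have hperm1 :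
      (if sx ≠ ex then
        List.foldl (fun h t => if t.2.2.1 ≤ sy ∧ sy ≤ t.2.2.2 then h ++ [(t.2.1, t.1, sy)] else h) []
          (PySem.List.slice (PySem.List.sorted (E.filterMap pvFV) (fun t => t.1))
            (some ((pvBounds (fun t => t.1) (PySem.List.sorted (E.filterMap pvFV) (fun t => t.1)) (min sx ex) (max sx ex)).1 : Int))
            (some ((pvBounds (fun t => t.1) (PySem.List.sorted (E.filterMap pvFV) (fun t => t.1)) (min sx ex) (max sx ex)).2 : Int)))
      else []).Perm (E.filterMap (pvG1 sx sy ex ey)) := by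
    by_cases hx : sx ≠ ex
    · rw [if_pos hx, hfold1]
      have hmap := ((PySem.List.sorted_perm (E.filterMap pvFV) (fun t => t.1) false).filter
        (fun t => decide (t.2.2.1 ≤ sy ∧ sy ≤ t.2.2.2) && (decide (min sx ex ≤ t.1) && decide (t.1 ≤ max sx ex)))).map
        (fun t => (t.2.1, t.1, sy))
      have heq : (((E.filterMap pvFV).filter
          (fun t => decide (t.2.2.1 ≤ sy ∧ sy ≤ t.2.2.2) && (decide (min sx ex ≤ t.1) && decide (t.1 ≤ max sx ex)))).map
          (fun t => (t.2.1, t.1, sy))) = E.filterMap (pvG1 sx sy ex ey) := by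
        rw [List.filter_filterMap, List.map_filterMap]
        apply List.filterMap_congr
        intro x _
        simp only [pvG1, if_pos hx]
      exact heq ▸ hmap
    · rw [if_neg hx]
      have hnil : E.filterMap (pvG1 sx sy ex ey) = [] := by
        have : ∀ x ∈ E, pvG1 sx sy ex ey x = (fun _ => (none : Option (Int × Int × Int))) x := by
          intro x _; simp only [pvG1, if_neg hx]
        rw [List.filterMap_congr this, List.filterMap_none]
      rw [hnil]
  have hperm : (if sy ≠ ey then
        List.foldl
          (fun h t => if ¬(sx ≠ ex ∧ t.2.2.2.2 = true) ∧ t.2.2.1 ≤ sx ∧ sx ≤ t.2.2.2.1 then h ++ [(t.2.1, sx, t.1)] else h)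
          (if sx ≠ ex then
            List.foldl (fun h t => if t.2.2.1 ≤ sy ∧ sy ≤ t.2.2.2 then h ++ [(t.2.1, t.1, sy)] else h) []
              (PySem.List.slice (PySem.List.sorted (E.filterMap pvFV) (fun t => t.1))
                (some ((pvBounds (fun t => t.1) (PySem.List.sorted (E.filterMap pvFV) (fun t => t.1)) (min sx ex) (max sx ex)).1 : Int))
                (some ((pvBounds (fun t => t.1) (PySem.List.sorted (E.filterMap pvFV) (fun t => t.1)) (min sx ex) (max sx ex)).2 : Int)))
          else [])
          (PySem.List.slice (PySem.List.sorted (E.filterMap pvFH) (fun t => t.1))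
            (some ((pvBounds (fun t => t.1) (PySem.List.sorted (E.filterMap pvFH) (fun t => t.1)) (min sy ey) (max sy ey)).1 : Int))
            (some ((pvBounds (fun t => t.1) (PySem.List.sorted (E.filterMap pvFH) (fun t => t.1)) (min sy ey) (max sy ey)).2 : Int)))
      else
        if sx ≠ ex then
          List.foldl (fun h t => if t.2.2.1 ≤ sy ∧ sy ≤ t.2.2.2 then h ++ [(t.2.1, t.1, sy)] else h) []
            (PySem.List.slice (PySem.List.sorted (E.filterMap pvFV) (fun t => t.1))
              (some ((pvBounds (fun t => t.1) (PySem.List.sorted (E.filterMap pvFV) (fun t => t.1)) (min sx ex) (max sx ex)).1 : Int))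
              (some ((pvBounds (fun t => t.1) (PySem.List.sorted (E.filterMap pvFV) (fun t => t.1)) (min sx ex) (max sx ex)).2 : Int)))
        else []).Perm (E.filterMap (pvG1 sx sy ex ey) ++ E.filterMap (pvG2 sx sy ex ey)) := by
    by_cases hy : sy ≠ ey
    · rw [if_pos hy]
      rw [pvBounds_slice (fun t : Int × Int × Int × Int × Bool => t.1)
        (PySem.List.sorted (E.filterMap pvFH) (fun t => t.1)) (min sy ey) (max sy ey) hsh]
      rw [foldl_append_if' (fun t : Int × Int × Int × Int × Bool => ¬(sx ≠ ex ∧ t.2.2.2.2 = true) ∧ t.2.2.1 ≤ sx ∧ sx ≤ t.2.2.2.1)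
        (fun t => (t.2.1, sx, t.1)), List.filter_filter]
      have heq2 : (((E.filterMap pvFH).filter
          (fun t => decide (¬(sx ≠ ex ∧ t.2.2.2.2 = true) ∧ t.2.2.1 ≤ sx ∧ sx ≤ t.2.2.2.1) &&
            (decide (min sy ey ≤ t.1) && decide (t.1 ≤ max sy ey)))).map
          (fun t => (t.2.1, sx, t.1))) = E.filterMap (pvG2 sx sy ex ey) := by
        rw [List.filter_filterMap, List.map_filterMap]
        apply List.filterMap_congr
        intro x _
        simp only [pvG2, if_pos hy]
      have hmap2 := ((PySem.List.sorted_perm (E.filterMap pvFH) (fun t => t.1) false).filter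
        (fun t => decide (¬(sx ≠ ex ∧ t.2.2.2.2 = true) ∧ t.2.2.1 ≤ sx ∧ sx ≤ t.2.2.2.1) &&
          (decide (min sy ey ≤ t.1) && decide (t.1 ≤ max sy ey)))).map (fun t => (t.2.1, sx, t.1))
      exact List.Perm.append hperm1 (heq2 ▸ hmap2)
    · rw [if_neg hy]
      have hnil : E.filterMap (pvG2 sx sy ex ey) = [] := by
        have : ∀ x ∈ E, pvG2 sx sy ex ey x = (fun _ => (none : Option (Int × Int × Int))) x := by
          intro x _; simp only [pvG2, if_neg hy]
        rw [List.filterMap_congr this, List.filterMap_none]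
      rw [hnil, List.append_nil]
      exact hperm1
  have hA : E.filterMap (pvA ((sx, sy), (ex, ey)))
      = E.filterMap (fun x => (pvG1 sx sy ex ey x).or (pvG2 sx sy ex ey x)) :=
    List.filterMap_congr (fun x _ => point_or sx sy ex ey x)
  have hAperm : (E.filterMap (pvA ((sx, sy), (ex, ey)))).Perm
      (E.filterMap (pvG1 sx sy ex ey) ++ E.filterMap (pvG2 sx sy ex ey)) := by
    rw [hA]
    exact (filterMap_append_perm (pvG1 sx sy ex ey) (pvG2 sx sy ex ey) _ E
      (fun x _ => rfl) (fun x _ => pvG_disjoint sx sy ex ey x)).symm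
  apply PySem.List.sorted_eq_of_perm_of_pairwise_lt
  · exact hAperm.trans hperm.symm
  · rw [List.pairwise_filterMap]
    refine hE.imp_of_mem ?_
    intro p q hp hq hlt b hb b' hb'
    simp only [pvA, Option.map_eq_some_iff] at hb hb'
    obtain ⟨cb, -, hcb⟩ := hb
    obtain ⟨cb', -, hcb'⟩ := hb'
    subst hcb hcb'
    exact hlt

theorem get_crossing_points_eq (angles_1 angles_2 : List (Int × Int)) :
    get_crossing_points angles_1 angles_2 = get_crossing_points_alt angles_1 angles_2 := by
  have hb := build_spec (List.zip angles_2 angles_2.tail) 0 [] []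
  simp only [List.nil_append] at hb
  simp only [get_crossing_points, get_crossing_points_alt, PySem.List.slice_to_neg_one,
    PySem.List.slice_from_one, zip_dropLast_tail, hb]
  apply PySem.List.foldl_congr_mem
  intro acc p hp
  obtain ⟨⟨sx, sy⟩, ⟨ex, ey⟩⟩ := p
  rw [a_inner ((sx, sy), (ex, ey)) (List.zip angles_2 angles_2.tail) 0 acc]
  dsimp only
  rw [hits_eq (PySem.List.enumerate (List.zip angles_2 angles_2.tail) 0) sx sy ex ey
    (PySem.List.pairwise_lt_enumerate _ _)]

-- ===== VERDICT (by name: the statement is the Claim_ definition above) =====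
theorem get_crossing_points_spec : Claim_equal_get_crossing_points := by
  intro a1 a2 _
  unfold Spec_get_crossing_points
  exact get_crossing_points_eq a1 a2
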